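-- pv_equiv track=rewrite | github.com/bsiranosian/brown-compbio | CSCI2951/hw2/em_haplotype.py | explainingHaplotypes
-- ===== SOURCE A (Python) =====
-- import itertools
--
-- def explainingHaplotypes(genotype):
-- 	explainList = []
-- 	# get possible haplotypes for the individual genotype
-- 	pHaps = getHaplotypes([genotype])
-- 	# solve this the naive way so I don't have to rewrite getHaplotypes...
-- 	for hap in pHaps:
-- 		#print hap
-- 		pair = [hap, resolveGenotype(genotype, hap)]
-- 		if (pair not in explainList) and (pair[::-1] not in explainList):
-- 			explainList.append(pair)
-- 	return explainList
--
-- def getHaplotypes(gList):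
-- 	# remove duplicates
-- 	gList.sort()
-- 	uList = list(l for l,_ in itertools.groupby(gList))
-- 	# haplotype list to add to
-- 	hList = []
--
-- 	for u in uList:
-- 		# if no ambiguities
-- 		if (2 not in u) and (u not in hList):
-- 			hList.append(u)
-- 		# if ambiguities
-- 		else:
-- 			#temporary list to store
-- 			temp=[]
-- 			for pos in u:
-- 				if pos == 2:
-- 					if len(temp) ==0:
-- 						temp=[[0],[1]]
-- 					else:
-- 						temp0 = [l+[0] for l in temp]
-- 						temp1 = [l+[1] for l in temp]
-- 						temp = temp0 + temp1
-- 				else: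
-- 					if len(temp) ==0:
-- 						temp = [[pos]]
-- 					else:
-- 						temp = [l+[pos] for l in temp]
--
-- 			# add unique elements
-- 			for t in temp:
-- 				if t not in hList: hList.append(t)
--
-- 	return hList
--
-- def resolveGenotype(a, r):
-- 	o = []
-- 	# iterate over positions in vector
-- 	for i, j in zip(a,r):
-- 		# if same, oppsite is already defined
-- 		if i==j:
-- 			o.append(i)
-- 		# if i is ambiguous, take opposite of j
-- 		if i==2 and j==0:
-- 			o.append(1)
-- 		if i==2 and j==1:
-- 			o.append(0)
-- 	return o
-- ===== SOURCE B (Python) =====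
-- def explainingHaplotypes(genotype):
--     # Direct enumeration: one pair per choice of the first k-1 ambiguous bits,
--     # last ambiguous bit canonically 0; complement flips every ambiguous bit.
--     amb = [p for p, v in enumerate(genotype) if v == 2]
--     if not amb:
--         return [[list(genotype), list(genotype)]]
--     result = []
--     for i in range(2 ** (len(amb) - 1)):
--         hap = list(genotype)
--         comp = list(genotype)
--         t = i
--         for p in amb[:-1]:
--             b = t % 2
--             hap[p] = b
--             comp[p] = 1 - b
--             t //= 2
--         hap[amb[-1]] = 0
--         comp[amb[-1]] = 1
--         result.append([hap, comp])
--     return result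
-- ===== Notes on version B (the rewrite author's own statement) =====
-- stated objective: alternative
-- what changed: B scans the genotype once for ambiguous (==2) positions and directly emits each unordered haplotype pair exactly once by enumerating the 2^(k-1) bit patterns with the last ambiguous bit fixed to 0 and flipping bits for the complement, instead of A's generate-all-2^k-haplotypes, per-haplotype re-resolution and membership-scan deduplication of pairs.
import Mathlib
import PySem

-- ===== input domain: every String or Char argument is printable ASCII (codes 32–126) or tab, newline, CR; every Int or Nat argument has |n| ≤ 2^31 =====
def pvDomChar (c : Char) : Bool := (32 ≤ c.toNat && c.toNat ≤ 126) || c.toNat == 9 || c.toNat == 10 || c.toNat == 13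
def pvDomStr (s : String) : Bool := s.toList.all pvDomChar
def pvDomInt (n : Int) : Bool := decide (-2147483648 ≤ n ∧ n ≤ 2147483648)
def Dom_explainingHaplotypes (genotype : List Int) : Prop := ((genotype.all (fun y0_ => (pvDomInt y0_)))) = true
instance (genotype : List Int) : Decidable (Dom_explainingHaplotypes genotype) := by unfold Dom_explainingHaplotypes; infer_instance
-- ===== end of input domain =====

-- B replaces A's generate-all-haplotypes + membership-scan dedup of pairs by a single direct
-- enumeration that emits each unordered pair exactly once (objective: alternative).
-- (A sorts its local list [genotype]; the caller's genotype list itself is never mutated.)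

-- ===== PORT A =====

-- resolveGenotype: foldl over zip(a, r), three independent 'if's appending in order
def pyResolveGenotype (a r : List Int) : List Int :=
  (List.zip a r).foldl (fun o ij =>
    let o1 := if ij.1 = ij.2 then o ++ [ij.1] else o
    let o2 := if ij.1 = 2 ∧ ij.2 = 0 then o1 ++ [(1 : Int)] else o1
    if ij.1 = 2 ∧ ij.2 = 1 then o2 ++ [(0 : Int)] else o2) []

-- list(l for l,_ in itertools.groupby(gList)): heads of maximal runs of consecutive equal
-- elements (hand-ported, exact: groupby groups consecutive equals)
def groupbyHeads : List (List Int) → List (List Int)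
  | [] => []
  | x :: xs => x :: groupbyHeads (xs.dropWhile (fun y => y = x))
termination_by l => l.length
decreasing_by
  simp only [List.length_cons]
  have := List.length_dropWhile_le (fun y => decide (y = x)) xs
  omega

def pyGetHaplotypes (gList : List (List Int)) : List (List Int) :=
  let gs := PySem.List.sorted gList (fun x => x) false   -- gList.sort()
  let uList := groupbyHeads gs
  uList.foldl (fun hList u =>
    if ¬ (2 ∈ u) ∧ ¬ (u ∈ hList) then hList ++ [u]
    else
      let temp := u.foldl (fun temp pos =>
        if pos = 2 then
          if temp.length = 0 then [[0], [1]]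
          else temp.map (· ++ [0]) ++ temp.map (· ++ [1])
        else
          if temp.length = 0 then [[pos]]
          else temp.map (· ++ [pos])) []
      temp.foldl (fun hList t => if t ∈ hList then hList else hList ++ [t]) hList) []

def explainingHaplotypes (genotype : List Int) : List (List (List Int)) :=
  (pyGetHaplotypes [genotype]).foldl (fun explainList hap =>
    -- pair = [hap, resolveGenotype(genotype, hap)]; pair[::-1] = pair.reverse
    -- (PySem.List.slice?_none_none_neg_one)
    let pair := [hap, pyResolveGenotype genotype hap]
    if ¬ (pair ∈ explainList) ∧ ¬ (pair.reverse ∈ explainList) then explainList ++ [pair]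
    else explainList) []

-- ===== PORT B =====

def explainingHaplotypes_alt (genotype : List Int) : List (List (List Int)) :=
  -- amb = [p for p, v in enumerate(genotype) if v == 2]  (enumerate indices are ≥ 0, so .toNat is exact)
  let amb : List Nat :=
    (PySem.List.enumerate genotype).filterMap (fun pv => if pv.2 = 2 then some pv.1.toNat else none)
  if amb = [] then [[genotype, genotype]]
  else
    let last := amb.getLastD 0      -- amb[-1] (amb ≠ [])
    (PySem.List.pyRange 0 ((2 : Int) ^ (amb.length - 1)) 1).foldl (fun result i =>
      -- hap = list(genotype); comp = list(genotype); t = i; loop over amb[:-1]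
      -- (amb[:-1] = dropLast, PySem.List.slice_to_neg_one)
      let s := amb.dropLast.foldl
        (fun (hct : List Int × List Int × Int) p =>
          let b := PySem.Int.mod hct.2.2 2
          (hct.1.set p b, hct.2.1.set p (1 - b), PySem.Int.floordiv hct.2.2 2))
        (genotype, genotype, i)
      result ++ [[s.1.set last 0, s.2.1.set last 1]]) []

-- ===== PRECONDITION & SPEC =====
def Spec_explainingHaplotypes (genotype : List Int) (out : List (List (List Int))) : Prop := out = explainingHaplotypes_alt genotype
instance (genotype : List Int) (out : List (List (List Int))) : Decidable (Spec_explainingHaplotypes genotype out) := by unfold Spec_explainingHaplotypes; infer_instance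

-- ===== CLAIM (what is proved, stated in full; the proofs are below) =====
def Claim_equal_explainingHaplotypes : Prop := ∀ (genotype : List Int), Dom_explainingHaplotypes genotype → Spec_explainingHaplotypes genotype (explainingHaplotypes genotype)

-- ===== LEMMAS AND PROOFS =====

-- All bit vectors of length k, in A's enumeration order (first bit fastest)
def bvs : Nat → List (List Int)
  | 0 => [[]]
  | k + 1 => (bvs k).map (· ++ [0]) ++ (bvs k).map (· ++ [1])

-- substitute the 2s of g by the bits of bs, in order
def fill : List Int → List Int → List Int
  | [], _ => []
  | x :: gs, bs => if x = 2 then bs.headD 2 :: fill gs bs.tail else x :: fill gs bs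

-- read the substituted bits back (left inverse of fill)
def extractBits : List Int → List Int → List Int
  | [], _ => []
  | x :: gs, hs => if x = 2 then hs.headD 0 :: extractBits gs hs.tail else extractBits gs hs.tail

def flipv (bs : List Int) : List Int := bs.map (1 - ·)

-- per-pair output of resolveGenotype's loop body
def rstuff (ij : Int × Int) : List Int :=
  (if ij.1 = ij.2 then [ij.1] else []) ++ (if ij.1 = 2 ∧ ij.2 = 0 then [(1 : Int)] else [])
    ++ (if ij.1 = 2 ∧ ij.2 = 1 then [(0 : Int)] else [])

-- the ambiguous positions of g (B's amb), structurally
def ambN : List Int → List Nat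
  | [] => []
  | x :: gs => if x = 2 then 0 :: (ambN gs).map (· + 1) else (ambN gs).map (· + 1)

-- set the listed positions to the listed values
def setAll (l : List Int) (pl : List (Nat × Int)) : List Int :=
  pl.foldl (fun l pb => l.set pb.1 pb.2) l

-- n little-endian base-2 digits of t, Int arithmetic as in port B
def digs : Nat → Int → List Int
  | 0, _ => []
  | n + 1, t => PySem.Int.mod t 2 :: digs n (PySem.Int.floordiv t 2)

-- n-fold halving (the final value of B's t)
def iterDiv : Nat → Int → Int
  | 0, t => t
  | n + 1, t => iterDiv n (PySem.Int.floordiv t 2)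

def tempStep (temp : List (List Int)) (pos : Int) : List (List Int) :=
  if pos = 2 then
    if temp.length = 0 then [[0], [1]]
    else temp.map (· ++ [0]) ++ temp.map (· ++ [1])
  else
    if temp.length = 0 then [[pos]]
    else temp.map (· ++ [pos])

theorem bvs_ne_nil (k : Nat) : bvs k ≠ [] := by
  cases k <;> simp [bvs]
  exact bvs_ne_nil _

theorem length_of_mem_bvs {k : Nat} {bv : List Int} (h : bv ∈ bvs k) : bv.length = k := by
  induction k generalizing bv with
  | zero => simp [bvs] at h; simp [h]
  | succ k ih =>
    simp [bvs] at h
    rcases h with ⟨w, hw, rfl⟩ | ⟨w, hw, rfl⟩ <;> simp [ih hw]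

theorem bits_of_mem_bvs {k : Nat} {bv : List Int} (h : bv ∈ bvs k) : ∀ b ∈ bv, b = 0 ∨ b = 1 := by
  induction k generalizing bv with
  | zero => simp [bvs] at h; simp [h]
  | succ k ih =>
    simp [bvs] at h
    rcases h with ⟨w, hw, rfl⟩ | ⟨w, hw, rfl⟩ <;> intro b hb <;> simp at hb <;>
      rcases hb with hb | hb <;> first | exact ih hw b hb | simp [hb]

theorem nodup_bvs (k : Nat) : (bvs k).Nodup := by
  induction k with
  | zero => simp [bvs]
  | succ k ih =>
    simp only [bvs]
    refine List.Nodup.append ?_ ?_ ?_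
    · exact ih.map (fun a b hab => by simpa using hab)
    · exact ih.map (fun a b hab => by simpa using hab)
    · intro x hx hy
      simp at hx hy
      rcases hx with ⟨w, hw, rfl⟩
      rcases hy with ⟨w', hw', he⟩
      have h1 := length_of_mem_bvs hw
      have h2 := length_of_mem_bvs hw'
      have := List.append_inj_right he (by omega)
      simp at this

theorem flipv_mem_bvs {k : Nat} {bv : List Int} (h : bv ∈ bvs k) : flipv bv ∈ bvs k := by
  induction k generalizing bv with
  | zero => simp [bvs] at h ⊢; simp [h, flipv]
  | succ k ih =>
    simp [bvs] at h ⊢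
    rcases h with ⟨w, hw, rfl⟩ | ⟨w, hw, rfl⟩
    · right; exact ⟨flipv w, ih hw, by simp [flipv]⟩
    · left; exact ⟨flipv w, ih hw, by simp [flipv]⟩

theorem flipv_flipv {bv : List Int} (h : ∀ b ∈ bv, b = 0 ∨ b = 1) : flipv (flipv bv) = bv := by
  unfold flipv
  rw [List.map_map]
  conv_rhs => rw [← List.map_id bv]
  apply List.map_congr_left
  intro b hb
  rcases h b hb with rfl | rfl <;> simp

theorem extract_fill (g : List Int) (bv : List Int) (h : bv.length = g.count 2) :
    extractBits g (fill g bv) = bv := by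
  induction g generalizing bv with
  | nil =>
    simp at h
    simp [extractBits, h]
  | cons x gs ih =>
    by_cases hx : x = 2
    · subst hx
      rcases bv with _ | ⟨b, bs⟩
      · simp [List.count_cons] at h
      · simp [fill, extractBits] at h ⊢
        exact ih bs (by omega)
    · simp [fill, extractBits, hx] at h ⊢
      exact ih bv h

theorem fill_inj {g : List Int} {bv bv' : List Int} (h : bv.length = g.count 2)
    (h' : bv'.length = g.count 2) (he : fill g bv = fill g bv') : bv = bv' := by
  have := extract_fill g bv h
  rw [he, extract_fill g bv' h'] at this
  exact this.symm

theorem resolve_eq_flatMap (a r : List Int) :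
    pyResolveGenotype a r = (List.zip a r).flatMap rstuff := by
  unfold pyResolveGenotype
  have : ∀ (o : List Int) (ij : Int × Int),
      (let o1 := if ij.1 = ij.2 then o ++ [ij.1] else o
       let o2 := if ij.1 = 2 ∧ ij.2 = 0 then o1 ++ [(1 : Int)] else o1
       if ij.1 = 2 ∧ ij.2 = 1 then o2 ++ [(0 : Int)] else o2) = o ++ rstuff ij := by
    intro o ij
    simp only [rstuff]
    split_ifs <;> simp
  calc (List.zip a r).foldl _ [] = (List.zip a r).foldl (fun o ij => o ++ rstuff ij) [] := by
        apply PySem.List.foldl_congr_mem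
        intro acc x _
        exact this acc x
    _ = [] ++ (List.zip a r).flatMap rstuff := PySem.List.foldl_append_eq_flatMap _ _ _
    _ = _ := by simp

theorem resolve_self (g : List Int) : pyResolveGenotype g g = g := by
  rw [resolve_eq_flatMap]
  induction g with
  | nil => simp
  | cons x gs ih =>
    simp only [List.zip_cons_cons, List.flatMap_cons] at *
    rw [ih]
    rcases eq_or_ne x 2 with rfl | hx
    · simp [rstuff]
    · simp [rstuff, hx]

theorem resolve_fill (g : List Int) (bv : List Int) (h : bv.length = g.count 2)
    (hb : ∀ b ∈ bv, b = 0 ∨ b = 1) :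
    pyResolveGenotype g (fill g bv) = fill g (flipv bv) := by
  rw [resolve_eq_flatMap]
  induction g generalizing bv with
  | nil => simp [fill]
  | cons x gs ih =>
    by_cases hx : x = 2
    · subst hx
      rcases bv with _ | ⟨b, bs⟩
      · simp [List.count_cons] at h
      · have hcount : bs.length = gs.count 2 := by
          simp [List.count_cons] at h; omega
        have hb0 : b = 0 ∨ b = 1 := hb b (by simp)
        have hbs : ∀ b' ∈ bs, b' = 0 ∨ b' = 1 := fun b' hb' => hb b' (by simp [hb'])
        have ihx := ih bs hcount hbs
        rw [flipv] at ihx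
        rcases hb0 with rfl | rfl <;>
          simp [fill, flipv, rstuff, List.zip_cons_cons, ihx]
    · simp only [fill, if_neg hx, List.zip_cons_cons, List.flatMap_cons, flipv, List.map_cons]
      have h' : bv.length = gs.count 2 := by simp [List.count_cons, hx] at h; exact h
      have := ih bv h' hb
      rw [flipv] at this
      rw [this]
      simp [rstuff, hx]

theorem fill_append_ne (g : List Int) (x : Int) (bv : List Int) (hx : x ≠ 2) :
    fill (g ++ [x]) bv = fill g bv ++ [x] := by
  induction g generalizing bv with
  | nil => simp [fill, hx]
  | cons y gs ih =>
    by_cases hy : y = 2 <;> simp [fill, hy, ih]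

theorem fill_append_two (g : List Int) (b : Int) (bv : List Int) (h : bv.length = g.count 2) :
    fill (g ++ [2]) (bv ++ [b]) = fill g bv ++ [b] := by
  induction g generalizing bv with
  | nil =>
    simp at h
    subst h
    simp [fill]
  | cons y gs ih =>
    by_cases hy : y = 2
    · subst hy
      rcases bv with _ | ⟨c, cs⟩
      · simp [List.count_cons] at h
      · have : cs.length = gs.count 2 := by simp [List.count_cons] at h; omega
        simp [fill, ih cs this]
    · have h' : bv.length = gs.count 2 := by simp [List.count_cons, hy] at h; exact h
      simp [fill, hy, ih bv h']

theorem temp_eq (g : List Int) (hg : g ≠ []) :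
    g.foldl tempStep [] = (bvs (g.count 2)).map (fill g) := by
  induction g using List.reverseRecOn with
  | nil => simp at hg
  | append_singleton gs x ih =>
    rcases eq_or_ne gs [] with rfl | hgs
    · rcases eq_or_ne x 2 with rfl | hx
      · simp [tempStep, bvs, fill]
      · simp [tempStep, hx, bvs, fill, List.count_singleton', Ne.symm hx]
    · rw [List.foldl_append, ih hgs]
      have hne : (bvs (gs.count 2)).map (fill gs) ≠ [] := by
        simp [bvs_ne_nil]
      rcases eq_or_ne x 2 with rfl | hx
      · have hcnt : List.count 2 (gs ++ [(2 : Int)]) = gs.count 2 + 1 := by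
          simp [List.count_append]
        rw [hcnt]
        simp only [List.foldl_cons, List.foldl_nil, tempStep, List.length_eq_zero_iff]
        rw [if_pos trivial, if_neg hne]
        rw [bvs]
        rw [List.map_append, List.map_map, List.map_map, List.map_map, List.map_map]
        congr 1
        · apply List.map_congr_left
          intro bv hbv
          simp [Function.comp, fill_append_two gs 0 bv (length_of_mem_bvs hbv)]
        · apply List.map_congr_left
          intro bv hbv
          simp [Function.comp, fill_append_two gs 1 bv (length_of_mem_bvs hbv)]
      · have hcnt : List.count 2 (gs ++ [x]) = gs.count 2 := by
          simp [List.count_append, List.count_singleton']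
          exact hx
        rw [hcnt]
        simp only [List.foldl_cons, List.foldl_nil, tempStep, List.length_eq_zero_iff, hx,
          if_false]
        rw [if_neg hne]
        rw [List.map_map]
        apply List.map_congr_left
        intro bv hbv
        simp [Function.comp, fill_append_ne gs x bv hx]

-- dedup fold: adding each element if not present, over a Nodup list disjoint from acc
theorem dedup_fold (l : List (List Int)) (acc : List (List Int))
    (hnd : l.Nodup) (hdisj : ∀ t ∈ l, t ∉ acc) :
    l.foldl (fun h t => if t ∈ h then h else h ++ [t]) acc = acc ++ l := by
  induction l generalizing acc with
  | nil => simp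
  | cons x xs ih =>
    simp only [List.foldl_cons]
    rw [if_neg (hdisj x (by simp))]
    rw [ih (acc ++ [x]) hnd.of_cons]
    · simp
    · intro t ht
      simp only [List.mem_append, List.mem_singleton]
      rintro (h | rfl)
      · exact hdisj t (by simp [ht]) h
      · exact (List.nodup_cons.mp hnd).1 ht

-- the explain loop adds every pair when all pairs (and their reversals) are fresh
theorem fold_add_all (P : List Int → List (List Int)) (rev : List (List Int) → List (List Int))
    (hs : List (List Int)) (acc : List (List (List Int)))
    (hfresh : ∀ h ∈ hs, P h ∉ acc ∧ rev (P h) ∉ acc)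
    (hinj : ∀ h h', h ∈ hs → h' ∈ hs → (P h = P h' → h = h') ∧ P h ≠ rev (P h'))
    (hnd : hs.Nodup) :
    hs.foldl (fun e hap => if ¬ (P hap ∈ e) ∧ ¬ (rev (P hap) ∈ e) then e ++ [P hap] else e) acc
      = acc ++ hs.map P := by
  induction hs generalizing acc with
  | nil => simp
  | cons x xs ih =>
    simp only [List.foldl_cons]
    rw [if_pos ⟨(hfresh x (by simp)).1, (hfresh x (by simp)).2⟩]
    rw [ih (acc ++ [P x])]
    · simp
    · intro h hh
      constructor
      · simp only [List.mem_append, List.mem_singleton]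
        rintro (hc | hc)
        · exact (hfresh h (by simp [hh])).1 hc
        · have := (hinj h x (by simp [hh]) (by simp)).1 hc
          subst this
          exact (List.nodup_cons.mp hnd).1 hh
      · simp only [List.mem_append, List.mem_singleton]
        rintro (hc | hc)
        · exact (hfresh h (by simp [hh])).2 hc
        · exact (hinj x h (by simp) (by simp [hh])).2 hc.symm
    · intro h h' hh hh'
      exact hinj h h' (by simp [hh]) (by simp [hh'])
    · exact hnd.of_cons

-- the explain loop skips every pair whose reversal (or itself) is already present
theorem fold_skip_all (P : List Int → List (List Int)) (rev : List (List Int) → List (List Int))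
    (hs : List (List Int)) (acc : List (List (List Int)))
    (hseen : ∀ h ∈ hs, P h ∈ acc ∨ rev (P h) ∈ acc) :
    hs.foldl (fun e hap => if ¬ (P hap ∈ e) ∧ ¬ (rev (P hap) ∈ e) then e ++ [P hap] else e) acc
      = acc := by
  induction hs with
  | nil => simp
  | cons x xs ih =>
    simp only [List.foldl_cons]
    have : ¬ (¬ (P x ∈ acc) ∧ ¬ (rev (P x) ∈ acc)) := by
      rcases hseen x (by simp) with h | h <;> tauto
    rw [if_neg this]
    exact ih (fun h hh => hseen h (by simp [hh]))

-- B-side: the computed amb list is ambN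
theorem amb_eq_ambN_aux (g : List Int) (s : Nat) :
    (PySem.List.enumerate g (s : Int)).filterMap
        (fun pv => if pv.2 = 2 then some pv.1.toNat else none)
      = (ambN g).map (· + s) := by
  induction g generalizing s with
  | nil => simp [PySem.List.enumerate_nil, ambN]
  | cons x gs ih =>
    rw [PySem.List.enumerate_cons]
    have hs1 : (s : Int) + 1 = ((s + 1 : Nat) : Int) := by push_cast; ring
    rw [hs1, List.filterMap_cons]
    rcases eq_or_ne x 2 with rfl | hx
    · simp only [if_pos rfl, ambN, ih (s + 1), List.map_cons, List.map_map]
      simp [Function.comp, Int.toNat_natCast]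
      exact fun a _ => by omega
    · simp only [if_neg hx, ambN, hx, if_false, ih (s + 1), List.map_map]
      apply List.map_congr_left
      intro p _
      simp [Function.comp]
      omega

theorem amb_eq_ambN (g : List Int) :
    (PySem.List.enumerate g).filterMap (fun pv => if pv.2 = 2 then some pv.1.toNat else none)
      = ambN g := by
  have := amb_eq_ambN_aux g 0
  simpa using this

theorem ambN_eq_nil_iff (g : List Int) : ambN g = [] ↔ (2 : Int) ∉ g := by
  induction g with
  | nil => simp [ambN]
  | cons x gs ih =>
    rcases eq_or_ne x 2 with rfl | hx
    · simp [ambN]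
    · simp [ambN, hx, ih, Ne.symm hx]

theorem length_ambN (g : List Int) : (ambN g).length = g.count 2 := by
  induction g with
  | nil => simp [ambN]
  | cons x gs ih =>
    rcases eq_or_ne x 2 with rfl | hx
    · simp [ambN, ih, List.count_cons]
    · simp [ambN, hx, ih, List.count_cons, Ne.symm hx]

theorem setAll_shift (l : List Int) (y : Int) (pl : List (Nat × Int)) :
    setAll (y :: l) (pl.map (fun q => (q.1 + 1, q.2))) = y :: setAll l pl := by
  induction pl generalizing l with
  | nil => simp [setAll]
  | cons q qs ih =>
    simp only [List.map_cons, setAll, List.foldl_cons, List.set_cons_succ]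
    exact ih (l.set q.1 q.2)

theorem zip_shift (ps : List Nat) (bs : List Int) :
    (ps.map (· + 1)).zip bs = (ps.zip bs).map (fun q => (q.1 + 1, q.2)) := by
  induction ps generalizing bs with
  | nil => simp
  | cons p ps ih =>
    rcases bs with _ | ⟨b, bs⟩
    · simp
    · simp [ih]

theorem setAll_amb (g : List Int) (bv : List Int) (h : bv.length = (ambN g).length) :
    setAll g ((ambN g).zip bv) = fill g bv := by
  induction g generalizing bv with
  | nil => simp [ambN, setAll, fill]
  | cons x gs ih =>
    rcases eq_or_ne x 2 with rfl | hx
    · rcases bv with _ | ⟨b, bs⟩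
      · simp [ambN] at h
      · have hlen : bs.length = (ambN gs).length := by
          simp [ambN] at h
          omega
        rw [show ambN (2 :: gs) = 0 :: (ambN gs).map (· + 1) from by simp [ambN]]
        simp only [List.zip_cons_cons, setAll, List.foldl_cons, List.set_cons_zero]
        rw [zip_shift]
        rw [show List.foldl (fun l pb => l.set pb.1 pb.2) (b :: gs)
              (((ambN gs).zip bs).map (fun q => (q.1 + 1, q.2)))
            = setAll (b :: gs) (((ambN gs).zip bs).map (fun q => (q.1 + 1, q.2))) from rfl]
        rw [setAll_shift, ih bs hlen]
        simp [fill]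
    · have hlen : bv.length = (ambN gs).length := by
        simp [ambN, hx] at h
        omega
      rw [show ambN (x :: gs) = (ambN gs).map (· + 1) from by simp [ambN, hx]]
      rw [zip_shift]
      rw [show setAll (x :: gs) (((ambN gs).zip bv).map (fun q => (q.1 + 1, q.2)))
          = x :: setAll gs ((ambN gs).zip bv) from setAll_shift gs x ((ambN gs).zip bv)]
      rw [ih bv hlen]
      simp [fill, hx]

-- B's inner loop: sets the digit bits at the listed positions and halves t
theorem inner_fold (ps : List Nat) (h c : List Int) (t : Int) :
    ps.foldl (fun (hct : List Int × List Int × Int) p =>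
        let b := PySem.Int.mod hct.2.2 2
        (hct.1.set p b, hct.2.1.set p (1 - b), PySem.Int.floordiv hct.2.2 2)) (h, c, t)
      = (setAll h (ps.zip (digs ps.length t)),
         setAll c (ps.zip ((digs ps.length t).map (fun b => 1 - b))),
         iterDiv ps.length t) := by
  induction ps generalizing h c t with
  | nil => simp [setAll, digs, iterDiv]
  | cons p ps ih =>
    simp only [List.foldl_cons, List.length_cons, digs, List.zip_cons_cons, List.map_cons,
      setAll, iterDiv]
    exact ih (h.set p (PySem.Int.mod t 2)) (c.set p (1 - PySem.Int.mod t 2))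
      (PySem.Int.floordiv t 2)

theorem length_digs (n : Nat) (t : Int) : (digs n t).length = n := by
  induction n generalizing t with
  | zero => simp [digs]
  | succ n ih => simp [digs, ih]

theorem digs_lo (m t : Nat) (h : t < 2 ^ m) :
    digs (m + 1) (t : Int) = digs m (t : Int) ++ [0] := by
  induction m generalizing t with
  | zero =>
    interval_cases t
    simp [digs, PySem.Int.mod, PySem.Int.floordiv]
  | succ m ih =>
    have h2 : t / 2 < 2 ^ m := by
      have : 2 ^ (m + 1) = 2 * 2 ^ m := by ring
      omega
    rw [show digs (m + 1 + 1) (t : Int)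
        = PySem.Int.mod (t : Int) 2 :: digs (m + 1) (PySem.Int.floordiv (t : Int) 2) from rfl]
    rw [show digs (m + 1) (t : Int)
        = PySem.Int.mod (t : Int) 2 :: digs m (PySem.Int.floordiv (t : Int) 2) from rfl]
    rw [show PySem.Int.floordiv (t : Int) 2 = ((t / 2 : Nat) : Int) from
      PySem.Int.floordiv_natCast t 2]
    rw [ih (t / 2) h2]
    simp

theorem digs_hi (m t : Nat) (h : t < 2 ^ m) :
    digs (m + 1) ((2 ^ m + t : Nat) : Int) = digs m (t : Int) ++ [1] := by
  induction m generalizing t with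
  | zero =>
    interval_cases t
    simp [digs, PySem.Int.mod, PySem.Int.floordiv]
  | succ m ih =>
    have h2 : t / 2 < 2 ^ m := by
      have : 2 ^ (m + 1) = 2 * 2 ^ m := by ring
      omega
    have hmod : (2 ^ (m + 1) + t) % 2 = t % 2 := by
      have : 2 ^ (m + 1) = 2 * 2 ^ m := by ring
      omega
    have hdiv : (2 ^ (m + 1) + t) / 2 = 2 ^ m + t / 2 := by
      have : 2 ^ (m + 1) = 2 * 2 ^ m := by ring
      omega
    rw [show digs (m + 1 + 1) ((2 ^ (m + 1) + t : Nat) : Int)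
        = PySem.Int.mod ((2 ^ (m + 1) + t : Nat) : Int) 2
          :: digs (m + 1) (PySem.Int.floordiv ((2 ^ (m + 1) + t : Nat) : Int) 2) from rfl]
    rw [show digs (m + 1) (t : Int)
        = PySem.Int.mod (t : Int) 2 :: digs m (PySem.Int.floordiv (t : Int) 2) from rfl]
    rw [show PySem.Int.floordiv ((2 ^ (m + 1) + t : Nat) : Int) 2
        = (((2 ^ (m + 1) + t) / 2 : Nat) : Int) from PySem.Int.floordiv_natCast _ 2]
    rw [show PySem.Int.floordiv (t : Int) 2 = ((t / 2 : Nat) : Int) from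
      PySem.Int.floordiv_natCast t 2]
    rw [hdiv, ih (t / 2) h2]
    rw [show PySem.Int.mod ((2 ^ (m + 1) + t : Nat) : Int) 2
        = (((2 ^ (m + 1) + t) % 2 : Nat) : Int) from PySem.Int.mod_natCast _ 2]
    rw [show PySem.Int.mod (t : Int) 2 = ((t % 2 : Nat) : Int) from PySem.Int.mod_natCast t 2]
    rw [hmod]
    simp

theorem map_digs_range (m : Nat) :
    (List.range (2 ^ m)).map (fun t : Nat => digs m (t : Int)) = bvs m := by
  induction m with
  | zero => simp [digs, bvs]
  | succ m ih =>
    have : 2 ^ (m + 1) = 2 ^ m + 2 ^ m := by ring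
    rw [this, List.range_add, List.map_append, List.map_map]
    rw [show bvs (m + 1) = (bvs m).map (· ++ [0]) ++ (bvs m).map (· ++ [1]) from rfl]
    congr 1
    · rw [← ih, List.map_map]
      apply List.map_congr_left
      intro t ht
      simp only [Function.comp]
      exact digs_lo m t (List.mem_range.mp ht)
    · rw [← ih, List.map_map]
      apply List.map_congr_left
      intro t ht
      simp only [Function.comp]
      exact digs_hi m t (List.mem_range.mp ht)

theorem flipv_append_bit (bv : List Int) (b : Int) :
    flipv (bv ++ [b]) = flipv bv ++ [1 - b] := by
  simp [flipv]

theorem resolve_hap (g : List Int) (k : Nat) (hk : g.count 2 = k + 1) {bv : List Int}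
    (hm : bv ∈ bvs k) (b : Int) (hb : b = 0 ∨ b = 1) :
    pyResolveGenotype g (fill g (bv ++ [b])) = fill g (flipv bv ++ [1 - b]) := by
  rw [← flipv_append_bit]
  apply resolve_fill
  · rw [hk]
    simp [length_of_mem_bvs hm]
  · intro c hc
    rcases List.mem_append.mp hc with hc | hc
    · exact bits_of_mem_bvs hm c hc
    · rcases List.mem_singleton.mp hc with rfl
      exact hb


theorem setAll_append_single (l : List Int) (pl : List (Nat × Int)) (p : Nat) (v : Int) :
    setAll l (pl ++ [(p, v)]) = (setAll l pl).set p v := by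
  simp [setAll, List.foldl_append]

-- B's result, characterised over the bit vectors
theorem B_char (g : List Int) (h2 : (2 : Int) ∈ g) :
    explainingHaplotypes_alt g
      = (bvs (g.count 2 - 1)).map
          (fun bv => [fill g (bv ++ [0]), fill g (flipv (bv ++ [0]))]) := by
  unfold explainingHaplotypes_alt
  simp only [amb_eq_ambN]
  have hLne : ambN g ≠ [] := by
    rw [Ne, ambN_eq_nil_iff]
    simpa using h2
  rw [if_neg hLne]
  have hlast : (ambN g).dropLast ++ [(ambN g).getLastD 0] = ambN g := by
    rcases List.eq_nil_or_concat (ambN g) with h | ⟨dl, lastp, hsp⟩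
    · exact absurd h hLne
    · rw [hsp]
      simp [List.concat_eq_append]
  have hdl : (ambN g).dropLast.length = g.count 2 - 1 := by
    rw [List.length_dropLast, length_ambN]
  have hkpos : 0 < g.count 2 := List.count_pos_iff.mpr h2
  have hlen1 : (ambN g).dropLast.length + 1 = (ambN g).length := by
    conv_rhs => rw [← hlast]
    simp
  -- the range
  have hpow : (2 : Int) ^ ((ambN g).length - 1) = ((2 ^ (g.count 2 - 1) : Nat) : Int) := by
    rw [length_ambN]
    push_cast
    ring
  rw [hpow, PySem.List.pyRange_one]
  have htn : ((((2 ^ (g.count 2 - 1) : Nat) : Int)) - 0).toNat = 2 ^ (g.count 2 - 1) := by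
    rw [sub_zero, Int.toNat_natCast]
  rw [htn, List.foldl_map]
  -- each iteration appends one literal pair
  rw [show (fun (result : List (List (List Int))) (t : Nat) =>
        List.foldl (fun (hct : List Int × List Int × Int) p =>
            let b := PySem.Int.mod hct.2.2 2
            (hct.1.set p b, hct.2.1.set p (1 - b), PySem.Int.floordiv hct.2.2 2))
          (g, g, 0 + (t : Int)) (ambN g).dropLast
        |> (fun s => result ++ [[s.1.set ((ambN g).getLastD 0) 0,
              s.2.1.set ((ambN g).getLastD 0) 1]]))
      = (fun result t => result ++ [(fun t : Nat =>
          (fun s : List Int × List Int × Int => [s.1.set ((ambN g).getLastD 0) 0,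
              s.2.1.set ((ambN g).getLastD 0) 1])
            (List.foldl (fun (hct : List Int × List Int × Int) p =>
              let b := PySem.Int.mod hct.2.2 2
              (hct.1.set p b, hct.2.1.set p (1 - b), PySem.Int.floordiv hct.2.2 2))
            (g, g, 0 + (t : Int)) (ambN g).dropLast)) t]) from rfl]
  rw [PySem.List.foldl_append_singleton_eq_map]
  rw [List.nil_append]
  rw [← map_digs_range (g.count 2 - 1), List.map_map]
  apply List.map_congr_left
  intro t ht
  have hlt : t < 2 ^ (g.count 2 - 1) := List.mem_range.mp ht
  simp only [Function.comp]
  rw [inner_fold]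
  have hzero : (0 : Int) + (t : Int) = (t : Int) := by ring
  rw [hzero]
  have hdigs : ((ambN g).dropLast.zip
      (digs (ambN g).dropLast.length (t : Int))).length = (ambN g).dropLast.length := by
    simp [length_digs]
  -- first component
  have hlen_eq : (ambN g).dropLast.length = (digs (ambN g).dropLast.length (t : Int)).length :=
    (length_digs _ _).symm
  have key : ∀ b : Int,
      (setAll g ((ambN g).dropLast.zip (digs (ambN g).dropLast.length (t : Int)))).set
          ((ambN g).getLastD 0) b
        = fill g (digs (ambN g).dropLast.length (t : Int) ++ [b]) := by
    intro b
    rw [show (setAll g ((ambN g).dropLast.zip (digs (ambN g).dropLast.length (t : Int)))).set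
          ((ambN g).getLastD 0) b
        = setAll g (((ambN g).dropLast.zip (digs (ambN g).dropLast.length (t : Int)))
            ++ [((ambN g).getLastD 0, b)]) from (setAll_append_single g _ _ _).symm]
    rw [show [((ambN g).getLastD 0, b)] = ([(ambN g).getLastD 0].zip [b]) from rfl]
    rw [← List.zip_append hlen_eq]
    rw [hlast]
    apply setAll_amb
    simp only [List.length_append, length_digs, List.length_singleton]
    omega
  have key2 : ∀ b : Int,
      (setAll g ((ambN g).dropLast.zip
          ((digs (ambN g).dropLast.length (t : Int)).map (fun b => 1 - b)))).set
          ((ambN g).getLastD 0) b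
        = fill g ((digs (ambN g).dropLast.length (t : Int)).map (fun b => 1 - b) ++ [b]) := by
    intro b
    rw [show (setAll g ((ambN g).dropLast.zip
          ((digs (ambN g).dropLast.length (t : Int)).map (fun b => 1 - b)))).set
          ((ambN g).getLastD 0) b
        = setAll g (((ambN g).dropLast.zip
            ((digs (ambN g).dropLast.length (t : Int)).map (fun b => 1 - b)))
            ++ [((ambN g).getLastD 0, b)]) from (setAll_append_single g _ _ _).symm]
    rw [show [((ambN g).getLastD 0, b)] = ([(ambN g).getLastD 0].zip [b]) from rfl]
    rw [← List.zip_append (show (ambN g).dropLast.length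
        = ((digs (ambN g).dropLast.length (t : Int)).map (fun b => 1 - b)).length by
      simp [length_digs])]
    rw [hlast]
    apply setAll_amb
    simp only [List.length_append, List.length_map, length_digs, List.length_singleton]
    omega
  rw [key 0, key2 1, hdl]
  rw [flipv_append_bit]
  norm_num [flipv]

-- A's result, characterised over the same bit vectors
theorem A_char (g : List Int) (h2 : (2 : Int) ∈ g) :
    explainingHaplotypes g
      = (bvs (g.count 2 - 1)).map
          (fun bv => [fill g (bv ++ [0]), fill g (flipv (bv ++ [0]))]) := by
  have hgne : g ≠ [] := by rintro rfl; simp at h2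
  have hkpos : 0 < g.count 2 := List.count_pos_iff.mpr h2
  -- getHaplotypes [g] = temp = (bvs k).map (fill g)
  have hhap : pyGetHaplotypes [g] = (bvs (g.count 2)).map (fill g) := by
    have hgb : groupbyHeads (PySem.List.sorted [g] (fun x => x) false) = [g] := by
      rw [show PySem.List.sorted [g] (fun x => x) false = [g] from rfl]
      simp [groupbyHeads]
    simp only [pyGetHaplotypes, hgb]
    simp only [List.foldl_cons, List.foldl_nil]
    rw [if_neg (by simp [h2])]
    rw [show g.foldl (fun temp pos =>
        if pos = 2 then
          if temp.length = 0 then [[0], [1]]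
          else temp.map (· ++ [0]) ++ temp.map (· ++ [1])
        else
          if temp.length = 0 then [[pos]]
          else temp.map (· ++ [pos])) [] = g.foldl tempStep [] from rfl]
    rw [temp_eq g hgne]
    apply dedup_fold
    · apply List.Nodup.map_on _ (nodup_bvs _)
      intro bv hbv bv' hbv' he
      exact fill_inj (length_of_mem_bvs hbv ▸ rfl) (length_of_mem_bvs hbv' ▸ rfl) he
    · simp
  unfold explainingHaplotypes
  rw [hhap]
  have hk : g.count 2 = (g.count 2 - 1) + 1 := by omega
  rw [hk, show bvs ((g.count 2 - 1) + 1)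
      = (bvs (g.count 2 - 1)).map (· ++ [0]) ++ (bvs (g.count 2 - 1)).map (· ++ [1]) from rfl]
  rw [List.map_append, List.foldl_append]
  have hfun : (fun (explainList : List (List (List Int))) (hap : List Int) =>
      let pair := [hap, pyResolveGenotype g hap]
      if ¬ (pair ∈ explainList) ∧ ¬ (pair.reverse ∈ explainList) then explainList ++ [pair]
      else explainList)
      = (fun e hap => if ¬ ([hap, pyResolveGenotype g hap] ∈ e)
          ∧ ¬ (List.reverse [hap, pyResolveGenotype g hap] ∈ e)
        then e ++ [[hap, pyResolveGenotype g hap]] else e) := rfl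
  rw [hfun]
  -- members of the two halves
  have hmem0 : ∀ h ∈ ((bvs (g.count 2 - 1)).map (· ++ [(0 : Int)])).map (fill g),
      ∃ bv ∈ bvs (g.count 2 - 1), h = fill g (bv ++ [0]) := by
    intro h hh
    simp only [List.map_map, List.mem_map, Function.comp] at hh
    obtain ⟨bv, hbv, rfl⟩ := hh
    exact ⟨bv, hbv, rfl⟩
  have hmem1 : ∀ h ∈ ((bvs (g.count 2 - 1)).map (· ++ [(1 : Int)])).map (fill g),
      ∃ bv ∈ bvs (g.count 2 - 1), h = fill g (bv ++ [1]) := by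
    intro h hh
    simp only [List.map_map, List.mem_map, Function.comp] at hh
    obtain ⟨bv, hbv, rfl⟩ := hh
    exact ⟨bv, hbv, rfl⟩
  have hlenfill : ∀ (bv : List Int) (b : Int), bv ∈ bvs (g.count 2 - 1) →
      (bv ++ [b]).length = g.count 2 := by
    intro bv b hbv
    simp [length_of_mem_bvs hbv]
    omega
  have hinjfill : ∀ (bv bv' : List Int) (b b' : Int), bv ∈ bvs (g.count 2 - 1) →
      bv' ∈ bvs (g.count 2 - 1) → fill g (bv ++ [b]) = fill g (bv' ++ [b']) →
      bv ++ [b] = bv' ++ [b'] := by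
    intro bv bv' b b' hbv hbv' he
    exact fill_inj (hlenfill bv b hbv) (hlenfill bv' b' hbv') he
  -- stage 1: every pair from the 0-half is added
  rw [fold_add_all (fun h => [h, pyResolveGenotype g h]) List.reverse _ []
    (by simp)
    (by
      intro h h' hh hh'
      obtain ⟨bv, hbv, rfl⟩ := hmem0 h hh
      obtain ⟨bv', hbv', rfl⟩ := hmem0 h' hh'
      constructor
      · intro he
        simp only [List.cons.injEq] at he
        exact he.1
      · intro he
        simp only [] at he
        rw [resolve_hap g (g.count 2 - 1) (by omega) hbv' 0 (Or.inl rfl)] at he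
        have h01 : (1 : Int) - 0 = 1 := by ring
        rw [h01] at he
        simp only [List.reverse_cons, List.reverse_nil, List.nil_append,
          List.singleton_append, List.cons.injEq, and_true] at he
        have := hinjfill bv (flipv bv') 0 1 hbv (flipv_mem_bvs hbv') he.1
        have hl : bv.length = (flipv bv').length := by
          simp [flipv, length_of_mem_bvs hbv, length_of_mem_bvs hbv']
        have := List.append_inj_right this (by simpa using hl)
        simp at this)
    (by
      apply List.Nodup.map_on _ (((nodup_bvs (g.count 2 - 1)).map
        (fun a b hab => by simpa using hab)))
      intro h hh h' hh' he
      simp only [List.mem_map] at hh hh'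
      obtain ⟨bv, hbv, rfl⟩ := hh
      obtain ⟨bv', hbv', rfl⟩ := hh'
      exact hinjfill bv bv' 0 0 hbv hbv' he)]
  rw [List.nil_append]
  -- stage 2: every pair from the 1-half is skipped
  rw [fold_skip_all (fun h => [h, pyResolveGenotype g h]) List.reverse _ _
    (by
      intro h hh
      obtain ⟨bv, hbv, rfl⟩ := hmem1 h hh
      right
      beta_reduce
      rw [resolve_hap g (g.count 2 - 1) (by omega) hbv 1 (Or.inr rfl)]
      have h10 : (1 : Int) - 1 = 0 := by ring
      rw [h10]
      simp only [List.reverse_cons, List.reverse_nil, List.nil_append]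
      have hres : pyResolveGenotype g (fill g (flipv bv ++ [0])) = fill g (bv ++ [1]) := by
        rw [resolve_hap g (g.count 2 - 1) (by omega) (flipv_mem_bvs hbv) 0 (Or.inl rfl)]
        rw [flipv_flipv (bits_of_mem_bvs hbv)]
        norm_num
      refine List.mem_map.mpr ⟨fill g (flipv bv ++ [0]),
        List.mem_map.mpr ⟨flipv bv ++ [0],
          List.mem_map.mpr ⟨flipv bv, flipv_mem_bvs hbv, rfl⟩, rfl⟩, ?_⟩
      beta_reduce
      rw [hres]
      rfl)]
  -- identify the result
  rw [List.map_map, List.map_map]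
  simp only [Nat.add_sub_cancel]
  apply List.map_congr_left
  intro bv hbv
  simp only [Function.comp]
  rw [resolve_hap g (g.count 2 - 1) (by omega) hbv 0 (Or.inl rfl), flipv_append_bit]


-- ===== VERDICT (by name: the statement is the Claim_ definition above) =====
theorem explainingHaplotypes_spec : Claim_equal_explainingHaplotypes := by
  intro g _
  unfold Spec_explainingHaplotypes
  by_cases h2 : (2 : Int) ∈ g
  · rw [A_char g h2, B_char g h2]
  · -- no ambiguous position: both sides are [[g, g]]
    have hhap : pyGetHaplotypes [g] = [g] := by
      have hgb : groupbyHeads (PySem.List.sorted [g] (fun x => x) false) = [g] := by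
        rw [show PySem.List.sorted [g] (fun x => x) false = [g] from rfl]
        simp [groupbyHeads]
      simp only [pyGetHaplotypes, hgb]
      simp only [List.foldl_cons, List.foldl_nil]
      rw [if_pos ⟨h2, by simp⟩]
      simp
    unfold explainingHaplotypes
    rw [hhap]
    simp only [List.foldl_cons, List.foldl_nil]
    rw [resolve_self]
    rw [if_pos (by simp)]
    unfold explainingHaplotypes_alt
    simp only [amb_eq_ambN]
    rw [if_pos ((ambN_eq_nil_iff g).mpr h2)]
    simp
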